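-- pv_equiv track=rewrite | github.com/geekinglcq/opendac2018 | opendac2018/rules/pos.py | at_least_one_same_co_author
-- ===== SOURCE A (Python) =====
-- def at_least_one_same_co_author(paper_a, paper_b):
--     """
--     If two paper share at least one same co-authors, we assume that they have
--     the same author.
--     Return: True-Same authors False-Not sure
--     """
--     co_author_a = set([author['name'] for author in paper_a['authors']])
--     co_author_b = set([author['name'] for author in paper_b['authors']])
--     len_and = len(co_author_a & co_author_b)
--     if len_and >= 2:
--         return True
--     else:
--         return False
-- ===== SOURCE B (Python) =====
-- def at_least_one_same_co_author(paper_a, paper_b):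
--     """Sort the two deduplicated name lists and count shared names by a
--     two-pointer merge scan, with an early exit at the second match,
--     instead of hashing both sets and measuring their intersection."""
--     xs = sorted({author['name'] for author in paper_a['authors']})
--     ys = sorted({author['name'] for author in paper_b['authors']})
--     shared = 0
--     i = j = 0
--     while i < len(xs) and j < len(ys):
--         if xs[i] == ys[j]:
--             shared += 1
--             if shared >= 2:
--                 return True
--             i += 1
--             j += 1
--         elif xs[i] < ys[j]:
--             i += 1
--         else:
--             j += 1
--     return False
-- ===== Notes on version B (the rewrite author's own statement) =====
-- stated objective: alternative
-- what changed: B sorts the two deduplicated author-name lists and counts shared names with a two-pointer merge scan (early exit at the second match) instead of building two hash sets and measuring the length of their intersection.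
import Mathlib
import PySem

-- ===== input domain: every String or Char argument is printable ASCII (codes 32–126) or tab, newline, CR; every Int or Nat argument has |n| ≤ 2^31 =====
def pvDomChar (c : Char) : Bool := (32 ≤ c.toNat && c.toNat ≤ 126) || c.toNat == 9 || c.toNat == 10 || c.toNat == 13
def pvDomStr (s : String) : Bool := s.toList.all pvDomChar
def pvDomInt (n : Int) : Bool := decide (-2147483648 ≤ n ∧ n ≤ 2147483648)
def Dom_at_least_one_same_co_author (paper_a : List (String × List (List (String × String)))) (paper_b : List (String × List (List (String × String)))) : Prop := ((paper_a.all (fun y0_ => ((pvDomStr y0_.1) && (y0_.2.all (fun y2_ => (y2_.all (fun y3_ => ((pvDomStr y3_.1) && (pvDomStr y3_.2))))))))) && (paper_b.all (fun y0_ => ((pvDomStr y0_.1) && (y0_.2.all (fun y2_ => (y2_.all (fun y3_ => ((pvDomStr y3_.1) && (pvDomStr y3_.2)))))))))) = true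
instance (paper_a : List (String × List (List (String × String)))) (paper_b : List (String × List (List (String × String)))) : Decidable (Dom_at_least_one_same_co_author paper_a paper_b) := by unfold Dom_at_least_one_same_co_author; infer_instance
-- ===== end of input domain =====

-- B sorts the two deduplicated name lists and counts shared names by a two-pointer
-- merge scan with early exit, instead of building two hash sets and measuring their
-- intersection (objective: alternative algorithm, similar cost).


-- ===== PORT A =====
-- [author['name'] for author in paper['authors']] (total form; Pre_ guarantees both keys exist)
def pvNames (paper : List (String × List (List (String × String)))) : List String :=
  (((PySem.Dict.mk paper).get? "authors").getD []).map
    (fun au => ((PySem.Dict.mk au).get? "name").getD "")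

def at_least_one_same_co_author (paper_a : List (String × List (List (String × String)))) (paper_b : List (String × List (List (String × String)))) : Bool :=
  let co_author_a := PySem.Set.ofList (pvNames paper_a)
  let co_author_b := PySem.Set.ofList (pvNames paper_b)
  let len_and := PySem.Set.len (PySem.Set.inter co_author_a co_author_b)
  if 2 ≤ len_and then true else false

-- ===== PORT B =====
-- the two-pointer merge scan over the two sorted name lists, early exit at shared = 2
def pvMerge : List String → List String → Int → Bool
  | [], _, _ => false
  | _ :: _, [], _ => false
  | x :: xs, y :: ys, shared =>
    if x = y then
      if 2 ≤ shared + 1 then true else pvMerge xs ys (shared + 1)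
    else if x < y then pvMerge xs (y :: ys) shared
    else pvMerge (x :: xs) ys shared
termination_by xs ys _ => xs.length + ys.length

def at_least_one_same_co_author_alt (paper_a : List (String × List (List (String × String)))) (paper_b : List (String × List (List (String × String)))) : Bool :=
  let xs := PySem.List.sorted (PySem.Set.ofList (pvNames paper_a)) (fun x => x)
  let ys := PySem.List.sorted (PySem.Set.ofList (pvNames paper_b)) (fun x => x)
  pvMerge xs ys 0

-- ===== PRECONDITION & SPEC =====
-- Pre_ excludes exactly the inputs where Python A raises KeyError: a paper without the
-- 'authors' key, or an author dict without the 'name' key.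
def Pre_at_least_one_same_co_author (paper_a : List (String × List (List (String × String)))) (paper_b : List (String × List (List (String × String)))) : Prop :=
  (PySem.Dict.mk paper_a).contains "authors" = true ∧
  (PySem.Dict.mk paper_b).contains "authors" = true ∧
  (∀ au ∈ (((PySem.Dict.mk paper_a).get? "authors").getD []), (PySem.Dict.mk au).contains "name" = true) ∧
  (∀ au ∈ (((PySem.Dict.mk paper_b).get? "authors").getD []), (PySem.Dict.mk au).contains "name" = true)
instance (paper_a : List (String × List (List (String × String)))) (paper_b : List (String × List (List (String × String)))) : Decidable (Pre_at_least_one_same_co_author paper_a paper_b) := by unfold Pre_at_least_one_same_co_author; infer_instance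

def pvWitness_at_least_one_same_co_author : (List (String × List (List (String × String)))) × (List (String × List (List (String × String)))) :=
  ([("authors", [[("name", "a")], [("name", "b")]])], [("authors", [[("name", "a")], [("name", "b")]])])

def Spec_at_least_one_same_co_author (paper_a : List (String × List (List (String × String)))) (paper_b : List (String × List (List (String × String)))) (out : Bool) : Prop := out = at_least_one_same_co_author_alt paper_a paper_b
instance (paper_a : List (String × List (List (String × String)))) (paper_b : List (String × List (List (String × String)))) (out : Bool) : Decidable (Spec_at_least_one_same_co_author paper_a paper_b out) := by unfold Spec_at_least_one_same_co_author; infer_instance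

-- ===== CLAIM (what is proved, stated in full; the proofs are below) =====
def Claim_equal_at_least_one_same_co_author : Prop := ∀ (paper_a : List (String × List (List (String × String)))) (paper_b : List (String × List (List (String × String)))), Dom_at_least_one_same_co_author paper_a paper_b → Pre_at_least_one_same_co_author paper_a paper_b → Spec_at_least_one_same_co_author paper_a paper_b (at_least_one_same_co_author paper_a paper_b)

-- ===== LEMMAS AND PROOFS =====

-- on strictly sorted lists the merge scan decides whether shared + |{x ∈ xs : x ∈ ys}| reaches 2
theorem pvMerge_eq : ∀ (n : Nat) (xs ys : List String) (c : Int),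
    xs.length + ys.length ≤ n → xs.Pairwise (· < ·) → ys.Pairwise (· < ·) → 0 ≤ c → c ≤ 1 →
    pvMerge xs ys c = decide (2 ≤ c + ((xs.filter (fun x => decide (x ∈ ys))).length : Int)) := by
  intro n
  induction n with
  | zero =>
    intro xs ys c hn _ _ h0 h1
    match xs, hn with
    | [], _ => simp [pvMerge]; omega
    | x :: xs, hn => simp [List.length_cons] at hn
  | succ m ih =>
    intro xs ys c hn hxs hys h0 h1
    match xs, ys with
    | [], ys => simp [pvMerge]; omega
    | x :: xs, [] =>
      simp only [pvMerge, List.not_mem_nil, decide_false]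
      simp; omega
    | x :: xs, y :: ys =>
      simp only [pvMerge]
      simp only [List.length_cons] at hn
      have hxs' := hxs.of_cons
      have hys' := hys.of_cons
      by_cases hxy : x = y
      · subst hxy
        have hfilt : xs.filter (fun z => decide (z ∈ x :: ys)) = xs.filter (fun z => decide (z ∈ ys)) := by
          apply List.filter_congr
          intro z hz
          have hne : z ≠ x := by
            intro h; subst h; exact lt_irrefl z ((List.pairwise_cons.mp hxs).1 z hz)
          simp [List.mem_cons, hne]
        have hR : ((x :: xs).filter (fun z => decide (z ∈ x :: ys))).length
            = (xs.filter (fun z => decide (z ∈ ys))).length + 1 := by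
          rw [List.filter_cons, if_pos (by simp), hfilt]
          simp
        rw [if_pos rfl, hR]
        by_cases hc : (2 : Int) ≤ c + 1
        · rw [if_pos hc, eq_comm, decide_eq_true_iff]
          push_cast; omega
        · rw [if_neg hc, ih xs ys (c + 1) (by omega) hxs' hys' (by omega) (by omega),
            decide_eq_decide]
          push_cast; omega
      · rw [if_neg hxy]
        by_cases hlt : x < y
        · rw [if_pos hlt,
            ih xs (y :: ys) c (by simp only [List.length_cons]; omega) hxs' hys h0 h1]
          have hmem : x ∉ y :: ys := by
            intro hmem
            rcases List.mem_cons.mp hmem with h | h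
            · exact hxy h
            · exact absurd (lt_trans hlt ((List.pairwise_cons.mp hys).1 x h)) (lt_irrefl x)
          have hR : ((x :: xs).filter (fun z => decide (z ∈ y :: ys))).length
              = (xs.filter (fun z => decide (z ∈ y :: ys))).length := by
            rw [List.filter_cons, if_neg (by simpa using hmem)]
          rw [hR]
        · rw [if_neg hlt,
            ih (x :: xs) ys c (by simp only [List.length_cons]; omega) hxs hys' h0 h1]
          have hyx : y < x := lt_of_le_of_ne (not_lt.mp hlt) (fun h => hxy h.symm)
          have hfilt : (x :: xs).filter (fun z => decide (z ∈ y :: ys))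
              = (x :: xs).filter (fun z => decide (z ∈ ys)) := by
            apply List.filter_congr
            intro z hz
            have hyz : y < z := by
              rcases List.mem_cons.mp hz with h | h
              · subst h; exact hyx
              · exact lt_trans hyx ((List.pairwise_cons.mp hxs).1 z h)
            have hne : z ≠ y := by
              intro h; subst h; exact lt_irrefl z hyz
            simp [List.mem_cons, hne]
          rw [hfilt]

-- the sorted dedup of l is strictly sorted
theorem sorted_ofList_pairwise (l : List String) :
    (PySem.List.sorted (PySem.Set.ofList l) (fun x => x)).Pairwise (· < ·) := by
  have h1 := PySem.List.sorted_pairwise (PySem.Set.ofList l) (fun x => x)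
  have h2 : (PySem.List.sorted (PySem.Set.ofList l) (fun x => x)).Nodup :=
    ((PySem.List.sorted_perm (PySem.Set.ofList l) (fun x => x) false).nodup_iff).mpr
      (PySem.Set.nodup_ofList l)
  exact (h1.and h2).imp (fun h => lt_of_le_of_ne h.1 h.2)

-- the number of shared names the merge counts equals |set_a ∩ set_b|
theorem filter_sorted_length (la lb : List String) :
    (((PySem.List.sorted (PySem.Set.ofList la) (fun x => x)).filter
        (fun x => decide (x ∈ PySem.List.sorted (PySem.Set.ofList lb) (fun x => x)))).length : Int)
      = PySem.Set.len (PySem.Set.inter (PySem.Set.ofList la) (PySem.Set.ofList lb)) := by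
  have hpa := PySem.List.sorted_perm (PySem.Set.ofList la) (fun x => x) false
  have hpb := PySem.List.sorted_perm (PySem.Set.ofList lb) (fun x => x) false
  have hmem : ∀ x, decide (x ∈ PySem.List.sorted (PySem.Set.ofList lb) (fun x => x))
      = (PySem.Set.ofList lb).contains x := by
    intro x
    rw [PySem.Set.contains_eq_listContains]
    simp [hpb.mem_iff]
  simp only [hmem]
  rw [← List.countP_eq_length_filter, hpa.countP_eq, List.countP_eq_length_filter]
  rfl

-- ===== VERDICT (by name: the statement is the Claim_ definition above) =====
theorem at_least_one_same_co_author_spec : Claim_equal_at_least_one_same_co_author := by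
  intro paper_a paper_b _hdom _hpre
  unfold Spec_at_least_one_same_co_author
  unfold at_least_one_same_co_author at_least_one_same_co_author_alt
  simp only []
  rw [pvMerge_eq ((PySem.List.sorted (PySem.Set.ofList (pvNames paper_a)) (fun x => x)).length
        + (PySem.List.sorted (PySem.Set.ofList (pvNames paper_b)) (fun x => x)).length)
      _ _ 0 le_rfl (sorted_ofList_pairwise _) (sorted_ofList_pairwise _) (by omega) (by omega)]
  rw [zero_add, filter_sorted_length]
  split_ifs with h
  · exact (decide_eq_true h).symm
  · exact (decide_eq_false h).symm
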